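-- pv_equiv track=rewrite | github.com/trustedsec/hate_crack | PACK/maskgen.py | getcomplexity
-- ===== SOURCE A (Python) =====
-- def getcomplexity(mask):
--     """ Return mask complexity. """
--     count = 1
--     for char in mask[1:].split("?"):
--         if char == "l":
--             count *= 26
--         elif char == "u":
--             count *= 26
--         elif char == "d":
--             count *= 10
--         elif char == "s":
--             count *= 33
--         elif char == "a":
--             count *= 95
--         else:
--             print
--         "[!] Error, unknown mask ?%s in a mask %s" % (char, mask)
--
--     return count
-- ===== SOURCE B (Python) =====
-- _BASES = {'l': 26, 'u': 26, 'd': 10, 's': 33, 'a': 95}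
--
-- def getcomplexity(mask):
--     """ Return mask complexity. """
--     freq = {}
--     for tok in mask[1:].split("?"):
--         freq[tok] = freq.get(tok, 0) + 1
--     count = 1
--     for letter, base in _BASES.items():
--         count *= base ** freq.get(letter, 0)
--     return count
-- ===== Notes on version B (the rewrite author's own statement) =====
-- stated objective: alternative
-- what changed: Replaces A's per-token if/elif multiply loop by a frequency table of the split tokens and a product of base**count over a fixed base mapping.
import Mathlib
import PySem

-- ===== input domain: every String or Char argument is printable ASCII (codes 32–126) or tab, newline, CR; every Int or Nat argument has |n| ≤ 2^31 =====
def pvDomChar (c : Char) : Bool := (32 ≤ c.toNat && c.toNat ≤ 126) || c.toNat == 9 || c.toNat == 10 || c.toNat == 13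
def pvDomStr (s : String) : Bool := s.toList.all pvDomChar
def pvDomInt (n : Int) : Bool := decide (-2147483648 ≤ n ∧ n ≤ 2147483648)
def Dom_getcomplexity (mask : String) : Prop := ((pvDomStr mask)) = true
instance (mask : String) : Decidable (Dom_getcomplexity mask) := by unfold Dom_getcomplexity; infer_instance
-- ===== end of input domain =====

-- B replaces A's per-token if/elif multiply loop by a token frequency table and a
-- product of base^count over the fixed base mapping (objective: alternative decomposition).

-- ===== PORT A =====
-- for char in mask[1:].split("?"): if/elif chain multiplying count; unknown tokens are a no-op.
def getcomplexity (mask : String) : Int :=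
  (PySem.Chars.splitOn (PySem.Str.slice mask (some 1) none).toList "?".toList).foldl
    (fun count ch =>
      if ch == ['l'] then count * 26
      else if ch == ['u'] then count * 26
      else if ch == ['d'] then count * 10
      else if ch == ['s'] then count * 33
      else if ch == ['a'] then count * 95
      else count) 1

-- ===== PORT B =====
-- _BASES = {'l': 26, 'u': 26, 'd': 10, 's': 33, 'a': 95}
def pvBases : List (List Char × Int) :=
  [(['l'], 26), (['u'], 26), (['d'], 10), (['s'], 33), (['a'], 95)]

-- freq[tok] = freq.get(tok, 0) + 1 over the tokens, then product over _BASES of base ** freq.get(letter, 0)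
def getcomplexity_alt (mask : String) : Int :=
  let freq : PySem.Dict (List Char) Int :=
    (PySem.Chars.splitOn (PySem.Str.slice mask (some 1) none).toList "?".toList).foldl
      (fun d t => d.modify t 0 (· + 1)) PySem.Dict.empty
  pvBases.foldl (fun count p => count * p.2 ^ (freq.getD p.1 0).toNat) 1

-- ===== PRECONDITION & SPEC =====
def Spec_getcomplexity (mask : String) (out : Int) : Prop := out = getcomplexity_alt mask
instance (mask : String) (out : Int) : Decidable (Spec_getcomplexity mask out) := by unfold Spec_getcomplexity; infer_instance

-- ===== CLAIM (what is proved, stated in full; the proofs are below) =====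
def Claim_equal_getcomplexity : Prop := ∀ (mask : String), Dom_getcomplexity mask → Spec_getcomplexity mask (getcomplexity mask)

-- ===== LEMMAS AND PROOFS =====

-- A's loop computes c times the product of base^(count of each known token).
lemma loopA_eq (ts : List (List Char)) (c : Int) :
    ts.foldl
      (fun count ch =>
        if ch == ['l'] then count * 26
        else if ch == ['u'] then count * 26
        else if ch == ['d'] then count * 10
        else if ch == ['s'] then count * 33
        else if ch == ['a'] then count * 95
        else count) c
    = c * 26 ^ (ts.count ['l']) * 26 ^ (ts.count ['u']) * 10 ^ (ts.count ['d'])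
        * 33 ^ (ts.count ['s']) * 95 ^ (ts.count ['a']) := by
  induction ts generalizing c with
  | nil => simp
  | cons t ts ih =>
    simp only [List.foldl_cons, List.count_cons, ih]
    by_cases h1 : t = ['l'] <;> by_cases h2 : t = ['u'] <;> by_cases h3 : t = ['d'] <;>
      by_cases h4 : t = ['s'] <;> by_cases h5 : t = ['a'] <;>
      simp_all [pow_succ] <;> ring

theorem getcomplexity_spec : Claim_equal_getcomplexity := by
  intro mask _
  unfold Spec_getcomplexity getcomplexity getcomplexity_alt
  rw [← PySem.Dict.counter_eq_foldl]
  simp only [PySem.Dict.getD_counter, pvBases, List.foldl_cons, List.foldl_nil, Int.toNat_natCast]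
  rw [loopA_eq]
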